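-- pv_equiv track=rewrite | github.com/SA-Inc/-Algorithm-and-Data-Structures | matrix/rotate_box.py | rotate_box
-- ===== SOURCE A (Python) =====
-- def rotate_box(box: list[list[str]]) -> list[list[str]]:
--   # rotate by 90 clockwise
--   rows = len(box)
--   cols = len(box[0])
--
--   # rotated box
--   rotated = [['.'] * rows for _ in range(cols)]
--
--   # empty = .
--   # wall = *
--   # stone = #
--
--   # two pointers method
--   # move by orginal box rows
--   for row in range(0, rows, 1):
--     right = cols - 1
--     for left in range(cols - 1, -1, -1):
--       # check left and right side if possible move stone
--       if(box[row][left] != '.'):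
--         if(box[row][left] == '*'):
--           right = left
--         # pass to rotated box
--         rotated[right][rows - row - 1] = box[row][left]
--         right -= 1
--
--   return rotated
-- ===== SOURCE B (Python) =====
-- def _settle(segment):
--   # stones (any non-'.' cell) keep their order and fall to the segment's right end
--   stones = [x for x in segment if x != '.']
--   return ['.'] * (len(segment) - len(stones)) + stones
--
-- def rotate_box(box):
--   cols = len(box[0])
--   # pass 1: settle each row by splitting it at walls and rebuilding each segment
--   settled = []
--   for row in box:
--     new_row, segment = [], []
--     for c in row[:cols]:
--       if c == '*':
--         new_row += _settle(segment) + ['*']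
--         segment = []
--       else:
--         segment.append(c)
--     settled.append(new_row + _settle(segment))
--   # pass 2: rotate 90 degrees clockwise = transpose of the vertically flipped grid
--   return [list(t) for t in zip(*settled[::-1])]
-- ===== Notes on version B (the rewrite author's own statement) =====
-- stated objective: alternative
-- what changed: B replaces A's fused right-to-left two-pointer scan that writes straight into rotated coordinates by a wall-segmentation pass (split each row at '*', rebuild each segment as dots followed by its filtered stones) and a separate pure rotation via transposing the flipped grid (zip(*settled[::-1])); there is no landing pointer at all.
import Mathlib
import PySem

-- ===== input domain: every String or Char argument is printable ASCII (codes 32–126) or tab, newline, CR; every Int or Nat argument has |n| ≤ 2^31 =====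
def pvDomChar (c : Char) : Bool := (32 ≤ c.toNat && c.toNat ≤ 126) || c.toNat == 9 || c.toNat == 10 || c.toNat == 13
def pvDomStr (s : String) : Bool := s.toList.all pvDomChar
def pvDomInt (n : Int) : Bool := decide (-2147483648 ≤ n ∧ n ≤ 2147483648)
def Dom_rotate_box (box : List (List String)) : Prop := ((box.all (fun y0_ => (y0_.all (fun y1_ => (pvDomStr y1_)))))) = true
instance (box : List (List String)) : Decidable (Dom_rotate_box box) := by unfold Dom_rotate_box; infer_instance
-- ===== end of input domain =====

-- B replaces A's fused two-pointer settle-and-rotate scan by wall-segmentation of each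
-- row (split at '*', rebuild each segment as dots ++ filtered stones) followed by a pure
-- rotation as a transpose of the flipped settled grid (objective: alternative).

-- ===== PORT A =====
-- inner loop body of A: for left in range(cols-1,-1,-1), state = (rotated, right)
def stepA (box : List (List String)) (rows row : Int)
    (st : List (List String) × Int) (left : Int) : List (List String) × Int :=
  let cell := PySem.List.pyGetD (PySem.List.pyGetD box row []) left ""
  if cell ≠ "." then
    let right := if cell = "*" then left else st.2
    (PySem.List.pySetD st.1 right
       (PySem.List.pySetD (PySem.List.pyGetD st.1 right []) (rows - row - 1) cell),
     right - 1)
  else st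

def rotate_box (box : List (List String)) : List (List String) :=
  let rows : Int := (box.length : Int)
  let cols : Int := ((PySem.List.pyGetD box 0 []).length : Int)
  let rotated : List (List String) :=
    (PySem.List.pyRange 0 cols 1).map (fun _ => List.replicate rows.toNat ".")
  (PySem.List.pyRange 0 rows 1).foldl
    (fun rotated row =>
      ((PySem.List.pyRange (cols - 1) (-1) (-1)).foldl (stepA box rows row)
        (rotated, cols - 1)).1)
    rotated

-- ===== PORT B =====
-- _settle(segment): dots, then the segment's non-'.' cells in order
def pad (seg : List String) : List String :=
  let stones := seg.filter (fun x => x ≠ ".")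
  List.replicate (seg.length - stones.length) "." ++ stones

-- body of B's per-row loop, state = (new_row, segment)
def rowStepB (st : List String × List String) (c : String) : List String × List String :=
  if c = "*" then (st.1 ++ (pad st.2 ++ ["*"]), [])
  else (st.1, st.2 ++ [c])

def settleRowB (cols : Int) (rl : List String) : List String :=
  let st := (PySem.List.slice rl none (some cols)).foldl rowStepB ([], [])
  st.1 ++ pad st.2

-- zip(*xss), ported by hand: zip() of no iterables is []; otherwise the output has
-- min-row-length rows. Exact here: i < every row's length, so getD's default is unused.
def zipStar (xss : List (List String)) : List (List String) :=
  match xss with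
  | [] => []
  | x :: rest =>
    let m := rest.foldl (fun acc r => min acc r.length) x.length
    (List.range m).map (fun i => (x :: rest).map (fun r => r.getD i ""))

def rotate_box_alt (box : List (List String)) : List (List String) :=
  let cols : Int := ((PySem.List.pyGetD box 0 []).length : Int)
  let settled := box.map (settleRowB cols)
  zipStar settled.reverse

-- ===== PRECONDITION & SPEC =====
-- Pre_ excludes exactly the inputs where Python A raises IndexError: the empty box
-- (len(box[0])) and boxes with a row shorter than the first row (box[row][left]).
def Pre_rotate_box (box : List (List String)) : Prop :=
  box ≠ [] ∧ ∀ r ∈ box, (box.headD []).length ≤ r.length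
instance (box : List (List String)) : Decidable (Pre_rotate_box box) := by
  unfold Pre_rotate_box; infer_instance

def pvWitness_rotate_box : List (List String) :=
  [["#", ".", "*", "."], [".", "#", ".", "#"], ["*", ".", ".", "#"]]

def Spec_rotate_box (box : List (List String)) (out : List (List String)) : Prop := out = rotate_box_alt box
instance (box : List (List String)) (out : List (List String)) : Decidable (Spec_rotate_box box out) := by unfold Spec_rotate_box; infer_instance

-- ===== CLAIM (what is proved, stated in full; the proofs are below) =====
def Claim_equal_rotate_box : Prop := ∀ (box : List (List String)), Dom_rotate_box box → Pre_rotate_box box → Spec_rotate_box box (rotate_box box)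

-- ===== LEMMAS AND PROOFS =====

-- proof-side reference gravity pass: A's inner two-pointer loop run on one row alone
def stepP (rl : List String) (st : List String × Int) (i : Int) : List String × Int :=
  let c := PySem.List.pyGetD rl i ""
  if c ≠ "." then
    let land := if c = "*" then i else st.2
    (PySem.List.pySetD st.1 land c, land - 1)
  else st

def settleRowP (cols : Int) (rl : List String) : List String :=
  ((PySem.List.pyRange (cols - 1) (-1) (-1)).foldl (stepP rl)
    (List.replicate cols.toNat ".", cols - 1)).1

-- resolution of a Python index depends only on the list's length
theorem pyIdx_lt (n : Nat) (i : Int) (w : Nat)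
    (h : PySem.List.pyIdx? n i = some w) : w < n := by
  unfold PySem.List.pyIdx? at h
  split_ifs at h <;> simp_all <;> omega

theorem pySetD_idx_some {α : Type} (xs : List α) (i : Int) (v : α) (w : Nat)
    (h : PySem.List.pyIdx? xs.length i = some w) :
    PySem.List.pySetD xs i v = xs.set w v := by
  unfold PySem.List.pySetD PySem.List.pySet?
  rw [h]; rfl

theorem pySetD_idx_none {α : Type} (xs : List α) (i : Int) (v : α)
    (h : PySem.List.pyIdx? xs.length i = none) :
    PySem.List.pySetD xs i v = xs := by
  unfold PySem.List.pySetD PySem.List.pySet?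
  rw [h]; rfl

theorem pyGetD_idx_some {α : Type} (xs : List α) (i : Int) (d : α) (w : Nat)
    (h : PySem.List.pyIdx? xs.length i = some w) :
    PySem.List.pyGetD xs i d = xs.getD w d := by
  unfold PySem.List.pyGetD PySem.List.pyGet?
  rw [h]
  simp [List.getD]

theorem getD_set_self {α : Type} (l : List α) (i : Nat) (v d : α) (h : i < l.length) :
    (l.set i v).getD i d = v := by
  simp [List.getD, h]

theorem getD_set_ne {α : Type} (l : List α) (i j : Nat) (v d : α) (h : j ≠ i) :
    (l.set i v).getD j d = l.getD j d := by
  simp [List.getD, Ne.symm h]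

-- one step of A's fused inner loop vs one step of the reference gravity inner loop
theorem step_rel (box : List (List String)) (rows row : Int) (n : Nat)
    (h0j : 0 ≤ rows - row - 1) (hjn : (rows - row - 1).toNat < n)
    (rot : List (List String)) (new : List String) (rt left : Int)
    (hlen : new.length = rot.length)
    (hn : ∀ c, c < rot.length → (rot.getD c []).length = n)
    (hcol : ∀ c, (rot.getD c []).getD (rows - row - 1).toNat "" = new.getD c "") :
    (stepA box rows row (rot, rt) left).2 = (stepP (PySem.List.pyGetD box row []) (new, rt) left).2 ∧
    (stepA box rows row (rot, rt) left).1.length = rot.length ∧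
    (stepP (PySem.List.pyGetD box row []) (new, rt) left).1.length = new.length ∧
    (∀ c, c < rot.length → ((stepA box rows row (rot, rt) left).1.getD c []).length = n) ∧
    (∀ c, ((stepA box rows row (rot, rt) left).1.getD c []).getD (rows - row - 1).toNat "" =
          (stepP (PySem.List.pyGetD box row []) (new, rt) left).1.getD c "") ∧
    (∀ c j', j' ≠ (rows - row - 1).toNat →
      ((stepA box rows row (rot, rt) left).1.getD c []).getD j' "" = (rot.getD c []).getD j' "") := by
  unfold stepA stepP
  by_cases hc : PySem.List.pyGetD (PySem.List.pyGetD box row []) left "" = "."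
  · simp only [hc, ne_eq, not_true_eq_false, if_false]
    exact ⟨by trivial, by trivial, by trivial, hn, hcol, fun c j' _ => by trivial⟩
  · simp only [hc, ne_eq, not_false_eq_true, if_true]
    cases hidx : PySem.List.pyIdx? rot.length
        (if PySem.List.pyGetD (PySem.List.pyGetD box row []) left "" = "*" then left else rt) with
    | none =>
      have hidx' : PySem.List.pyIdx? new.length
          (if PySem.List.pyGetD (PySem.List.pyGetD box row []) left "" = "*" then left else rt) = none := by
        rw [hlen]; exact hidx
      rw [pySetD_idx_none _ _ _ hidx, pySetD_idx_none _ _ _ hidx']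
      exact ⟨by trivial, by trivial, by trivial, hn, hcol, fun c j' _ => by trivial⟩
    | some w =>
      have hw : w < rot.length := pyIdx_lt _ _ _ hidx
      have hwn : w < new.length := by omega
      have hidx' : PySem.List.pyIdx? new.length
          (if PySem.List.pyGetD (PySem.List.pyGetD box row []) left "" = "*" then left else rt) = some w := by
        rw [hlen]; exact hidx
      rw [pySetD_idx_some _ _ _ _ hidx, pySetD_idx_some _ _ _ _ hidx',
          pyGetD_idx_some _ _ _ _ hidx, PySem.List.pySetD_of_nonneg _ _ h0j]
      refine ⟨by trivial, by simp, by simp, ?_, ?_, ?_⟩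
      · intro c hc'
        by_cases hcw : c = w
        · subst hcw
          rw [getD_set_self _ _ _ _ hw]
          rw [List.length_set]
          exact hn c hc'
        · rw [getD_set_ne _ _ _ _ _ hcw]
          exact hn c hc'
      · intro c
        by_cases hcw : c = w
        · subst hcw
          rw [getD_set_self _ _ _ _ hw, getD_set_self _ _ _ _ hwn]
          rw [getD_set_self]
          rw [hn c hw]; exact hjn
        · rw [getD_set_ne _ _ _ _ _ hcw, getD_set_ne _ _ _ _ _ hcw]
          exact hcol c
      · intro c j' hj'
        by_cases hcw : c = w
        · subst hcw
          rw [getD_set_self _ _ _ _ hw]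
          exact getD_set_ne _ _ _ _ _ hj'
        · rw [getD_set_ne _ _ _ _ _ hcw]

-- the two inner loops, run over the same index list, stay in lock-step
theorem fold_rel (box : List (List String)) (rows row : Int) (n : Nat)
    (h0j : 0 ≤ rows - row - 1) (hjn : (rows - row - 1).toNat < n) :
    ∀ (L : List Int) (rot : List (List String)) (new : List String) (rt : Int),
    new.length = rot.length →
    (∀ c, c < rot.length → (rot.getD c []).length = n) →
    (∀ c, (rot.getD c []).getD (rows - row - 1).toNat "" = new.getD c "") →
    ((L.foldl (stepA box rows row) (rot, rt)).2 =
       (L.foldl (stepP (PySem.List.pyGetD box row [])) (new, rt)).2) ∧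
    ((L.foldl (stepA box rows row) (rot, rt)).1.length = rot.length) ∧
    ((L.foldl (stepP (PySem.List.pyGetD box row [])) (new, rt)).1.length = new.length) ∧
    (∀ c, c < rot.length → (((L.foldl (stepA box rows row) (rot, rt)).1.getD c []).length = n)) ∧
    (∀ c, ((L.foldl (stepA box rows row) (rot, rt)).1.getD c []).getD (rows - row - 1).toNat "" =
          ((L.foldl (stepP (PySem.List.pyGetD box row [])) (new, rt)).1.getD c "")) ∧
    (∀ c j', j' ≠ (rows - row - 1).toNat →
      ((L.foldl (stepA box rows row) (rot, rt)).1.getD c []).getD j' "" = (rot.getD c []).getD j' "") := by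
  intro L
  induction L with
  | nil =>
    intro rot new rt hlen hn hcol
    exact ⟨rfl, rfl, rfl, hn, hcol, fun c j' _ => rfl⟩
  | cons x L ih =>
    intro rot new rt hlen hn hcol
    obtain ⟨h1, h2, h3, h4, h5, h6⟩ :=
      step_rel box rows row n h0j hjn rot new rt x hlen hn hcol
    have eA : stepA box rows row (rot, rt) x =
        ((stepA box rows row (rot, rt) x).1, (stepA box rows row (rot, rt) x).2) := rfl
    have eB : stepP (PySem.List.pyGetD box row []) (new, rt) x =
        ((stepP (PySem.List.pyGetD box row []) (new, rt) x).1,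
         (stepA box rows row (rot, rt) x).2) := by rw [h1]
    rw [List.foldl_cons, List.foldl_cons, eA, eB]
    obtain ⟨g1, g2, g3, g4, g5, g6⟩ :=
      ih (stepA box rows row (rot, rt) x).1 (stepP (PySem.List.pyGetD box row []) (new, rt) x).1
        (stepA box rows row (rot, rt) x).2
        (by omega) (by rw [h2]; exact h4) h5
    refine ⟨g1, by omega, by omega, ?_, g5, ?_⟩
    · intro c hc'; exact g4 c (by omega)
    · intro c j' hj'
      rw [g6 c j' hj', h6 c j' hj']

theorem getD_of_lt {α : Type} (l : List α) (i : Nat) (d : α) (h : i < l.length) :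
    l.getD i d = l[i] := by
  simp [List.getD, List.getElem?_eq_getElem h]

theorem getD_replicate' {α : Type} (n i : Nat) (x d : α) (h : i < n) :
    (List.replicate n x).getD i d = x := by
  rw [getD_of_lt _ _ _ (by simpa using h)]
  simp

-- the state of A's outer loop after its first k iterations
def roK (box : List (List String)) (k : Nat) : List (List String) :=
  (List.range k).foldl
    (fun (rotated : List (List String)) (kk : Nat) =>
      ((PySem.List.pyRange (((PySem.List.pyGetD box 0 []).length : Int) - 1) (-1) (-1)).foldl
        (stepA box (box.length : Int) (0 + (kk : Int)))
        (rotated, ((PySem.List.pyGetD box 0 []).length : Int) - 1)).1)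
    ((PySem.List.pyRange 0 ((PySem.List.pyGetD box 0 []).length : Int) 1).map
      (fun _ => List.replicate ((box.length : Int)).toNat "."))

theorem rotate_box_eq_roK (box : List (List String)) :
    rotate_box box = roK box box.length := by
  unfold rotate_box roK
  simp only [PySem.List.pyRange_one 0 (box.length : Int), List.foldl_map]
  norm_num

theorem outer_inv (box : List (List String)) :
    ∀ (k : Nat), k ≤ box.length →
    (roK box k).length = (PySem.List.pyGetD box 0 []).length ∧
    (∀ c, c < (PySem.List.pyGetD box 0 []).length →
       ((roK box k).getD c []).length = box.length) ∧
    (∀ c, c < (PySem.List.pyGetD box 0 []).length → ∀ r, r < k →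
       ((roK box k).getD c []).getD (box.length - 1 - r) "" =
       (settleRowP ((PySem.List.pyGetD box 0 []).length : Int) (box.getD r [])).getD c "") ∧
    (∀ c, c < (PySem.List.pyGetD box 0 []).length → ∀ j, j < box.length - k →
       ((roK box k).getD c []).getD j "" = ".") := by
  intro k
  induction k with
  | zero =>
    intro _
    have hlen0 : (roK box 0).length = (PySem.List.pyGetD box 0 []).length := by
      unfold roK
      simp [PySem.List.length_pyRange_one]
    have hget0 : ∀ c, c < (PySem.List.pyGetD box 0 []).length →
        (roK box 0).getD c [] = List.replicate box.length "." := by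
      intro c hc
      unfold roK
      rw [getD_of_lt _ _ _ (by simpa [PySem.List.length_pyRange_one] using hc)]
      simp
    refine ⟨hlen0, ?_, ?_, ?_⟩
    · intro c hc; rw [hget0 c hc]; simp
    · intro c _ r hr; omega
    · intro c hc j hj
      rw [hget0 c hc]
      exact getD_replicate' _ _ _ _ (by omega)
  | succ k ih =>
    intro hk1
    have hk : k < box.length := by omega
    obtain ⟨P1, P2, P3, P4⟩ := ih (by omega)
    have hstep : roK box (k + 1) =
        ((PySem.List.pyRange (((PySem.List.pyGetD box 0 []).length : Int) - 1) (-1) (-1)).foldl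
          (stepA box (box.length : Int) (0 + (k : Int)))
          (roK box k, ((PySem.List.pyGetD box 0 []).length : Int) - 1)).1 := by
      unfold roK
      rw [List.range_succ, List.foldl_append]
      rfl
    have h0j : (0 : Int) ≤ (box.length : Int) - (0 + (k : Int)) - 1 := by
      omega
    have hjn : ((box.length : Int) - (0 + (k : Int)) - 1).toNat < box.length := by
      omega
    have hjv : ((box.length : Int) - (0 + (k : Int)) - 1).toNat = box.length - 1 - k := by
      omega
    obtain ⟨F1, F2, F3, F4, F5, F6⟩ :=
      fold_rel box (box.length : Int) (0 + (k : Int)) box.length h0j hjn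
        (PySem.List.pyRange (((PySem.List.pyGetD box 0 []).length : Int) - 1) (-1) (-1))
        (roK box k) (List.replicate (PySem.List.pyGetD box 0 []).length ".")
        (((PySem.List.pyGetD box 0 []).length : Int) - 1)
        (by simp [P1])
        (by intro c hc; exact P2 c (by omega))
        (by
          intro c
          by_cases hc : c < (PySem.List.pyGetD box 0 []).length
          · rw [hjv, P4 c hc (box.length - 1 - k) (by omega),
              getD_replicate' _ _ _ _ hc]
          · rw [List.getD_eq_default (roK box k) [] (by rw [P1]; omega),
              List.getD_eq_default (List.replicate (PySem.List.pyGetD box 0 []).length ".") ""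
                (by simp only [List.length_replicate]; omega)]
            simp)
    have hrl : PySem.List.pyGetD box (0 + (k : Int)) [] = box.getD k [] := by
      rw [zero_add, PySem.List.pyGetD_natCast]
    have hsettle : ((PySem.List.pyRange (((PySem.List.pyGetD box 0 []).length : Int) - 1) (-1) (-1)).foldl
          (stepP (PySem.List.pyGetD box (0 + (k : Int)) []))
          (List.replicate (PySem.List.pyGetD box 0 []).length ".",
           ((PySem.List.pyGetD box 0 []).length : Int) - 1)).1 =
        settleRowP ((PySem.List.pyGetD box 0 []).length : Int) (box.getD k []) := by
      rw [hrl]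
      unfold settleRowP
      simp
    rw [hsettle] at F5
    refine ⟨?_, ?_, ?_, ?_⟩
    · rw [hstep, F2, P1]
    · intro c hc
      rw [hstep]
      exact F4 c (by omega)
    · intro c hc r hr
      rw [hstep]
      rcases Nat.lt_succ_iff_lt_or_eq.mp hr with hr' | hr'
      · rw [F6 c _ (by omega)]
        exact P3 c hc r hr'
      · subst hr'
        rw [← hjv, F5 c]
    · intro c hc j hj
      rw [hstep]
      rw [F6 c _ (by omega)]
      exact P4 c hc j (by omega)

-- ===== segment-gravity layer: the reference gravity pass equals B's segment rebuild =====

-- recursive spec of B's per-row fold: pending segment, then the rest of the row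
def settleWith : List String → List String → List String
  | seg, [] => pad seg
  | seg, c :: t => if c = "*" then pad seg ++ "*" :: settleWith [] t else settleWith (seg ++ [c]) t

def segPrefix (s : List String) : List String := s.takeWhile (fun c => c ≠ "*")

def dcount (s : List String) : Nat :=
  (segPrefix s).length - ((segPrefix s).filter (fun c => c ≠ ".")).length

def tailPart (s : List String) : List String :=
  match s.dropWhile (fun c => c ≠ "*") with
  | [] => []
  | _ :: t => "*" :: settleWith [] t

theorem filt_le (seg : List String) : (seg.filter (fun x => !decide (x = "."))).length ≤ seg.length :=
  List.length_filter_le _ _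

theorem pad_length (seg : List String) : (pad seg).length = seg.length := by
  have h := filt_le seg
  simp [pad]; omega

theorem pad_cons_dot (seg : List String) : pad ("." :: seg) = "." :: pad seg := by
  have h := filt_le seg
  simp only [pad, List.filter_cons, List.length_cons, ne_eq, decide_not]
  rw [if_neg (by decide), Nat.succ_sub (by simpa using h)]
  simp [List.replicate_succ]

theorem pad_cons_stone (c : String) (seg : List String) (h1 : c ≠ ".") :
    pad (c :: seg) =
      List.replicate (seg.length - (seg.filter (fun x => x ≠ ".")).length) "." ++
        c :: seg.filter (fun x => x ≠ ".") := by
  simp only [pad, List.filter_cons, List.length_cons, ne_eq, decide_not]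
  rw [if_pos (by simpa using h1), List.length_cons, Nat.succ_sub_succ]

theorem tailPart_cons_not_wall (c : String) (s : List String) (h2 : c ≠ "*") :
    tailPart (c :: s) = tailPart s := by
  simp only [tailPart, List.dropWhile_cons, ne_eq, decide_not]
  rw [if_pos (by simpa using h2)]

theorem segPrefix_cons_stone (c : String) (s : List String) (h2 : c ≠ "*") :
    segPrefix (c :: s) = c :: segPrefix s := by
  simp only [segPrefix, List.takeWhile_cons, ne_eq, decide_not]
  rw [if_pos (by simpa using h2)]

theorem settleWith_char : ∀ (s seg : List String),
    settleWith seg s = pad (seg ++ segPrefix s) ++ tailPart s := by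
  intro s
  induction s with
  | nil => intro seg; simp [settleWith, segPrefix, tailPart]
  | cons c t ih =>
    intro seg
    by_cases hc : c = "*"
    · subst hc
      have h1 : settleWith seg ("*" :: t) = pad seg ++ "*" :: settleWith [] t := by
        simp [settleWith]
      have h2 : segPrefix ("*" :: t) = [] := by simp [segPrefix]
      have h3 : tailPart ("*" :: t) = "*" :: settleWith [] t := by simp [tailPart]
      rw [h1, h2, h3, List.append_nil]
    · simp only [settleWith, if_neg hc, ih (seg ++ [c]),
        segPrefix_cons_stone c t hc, tailPart_cons_not_wall c t hc]
      simp [List.append_assoc]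

theorem settleWith_length : ∀ (s seg : List String),
    (settleWith seg s).length = seg.length + s.length := by
  intro s
  induction s with
  | nil => intro seg; simp [settleWith, pad_length]
  | cons c t ih =>
    intro seg
    by_cases hc : c = "*"
    · subst hc
      simp [settleWith, pad_length, ih []]
    · simp [settleWith, hc, ih (seg ++ [c])]
      omega

theorem sf_decomp (s : List String) :
    settleWith [] s =
      List.replicate (dcount s) "." ++ ((segPrefix s).filter (fun x => x ≠ ".") ++ tailPart s) := by
  rw [settleWith_char s []]
  simp only [List.nil_append, pad, dcount, List.append_assoc]

theorem sf_dot (s : List String) :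
    settleWith [] ("." :: s) = "." :: settleWith [] s := by
  rw [settleWith_char ("." :: s) [], settleWith_char s []]
  simp only [List.nil_append]
  rw [segPrefix_cons_stone "." s (by decide), pad_cons_dot,
    tailPart_cons_not_wall "." s (by decide)]
  simp

theorem sf_wall (s : List String) :
    settleWith [] ("*" :: s) = "*" :: settleWith [] s := by
  simp [settleWith, pad]

theorem sf_stone (c : String) (s : List String) (h1 : c ≠ ".") (h2 : c ≠ "*") :
    settleWith [] (c :: s) =
      List.replicate (dcount s) "." ++
        c :: ((segPrefix s).filter (fun x => x ≠ ".") ++ tailPart s) := by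
  rw [settleWith_char (c :: s) []]
  simp only [List.nil_append]
  rw [segPrefix_cons_stone c s h2, pad_cons_stone c _ h1,
    tailPart_cons_not_wall c s h2]
  simp [dcount, List.append_assoc]

theorem dcount_cons_dot (s : List String) : dcount ("." :: s) = dcount s + 1 := by
  have h := filt_le (segPrefix s)
  simp only [dcount, segPrefix, List.takeWhile_cons, ne_eq, decide_not] at *
  rw [if_pos (by decide), List.filter_cons, if_neg (by decide), List.length_cons]
  omega

theorem dcount_cons_wall (s : List String) : dcount ("*" :: s) = 0 := by
  simp [dcount, segPrefix]

theorem dcount_cons_stone (c : String) (s : List String) (h1 : c ≠ ".") (h2 : c ≠ "*") :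
    dcount (c :: s) = dcount s := by
  have h := filt_le (segPrefix s)
  simp only [dcount, segPrefix, List.takeWhile_cons, ne_eq, decide_not] at *
  rw [if_pos (by simpa using h2), List.filter_cons, if_pos (by simpa using h1),
    List.length_cons, List.length_cons]
  omega

theorem set_rep {x v : String} (j : Nat) (X : List String) :
    (List.replicate j x ++ x :: X).set j v = List.replicate j x ++ v :: X := by
  induction j with
  | zero => simp
  | succ j ih => simp [List.replicate_succ, ih]

theorem getD_of_lt' {α : Type} (l : List α) (i : Nat) (d : α) (h : i < l.length) :
    l.getD i d = l[i] := by
  simp [List.getD, List.getElem?_eq_getElem h]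

theorem scan_inv (rl : List String) (n : Nat) (hn : n ≤ rl.length) :
    ∀ k, k ≤ n →
    (((List.range' (n - k) k).reverse.map (fun m : Nat => (m : Int))).foldl (stepP rl)
        (List.replicate n ".", (n : Int) - 1))
    = (List.replicate (n - k) "." ++ settleWith [] ((rl.take n).drop (n - k)),
       ((n - k : Nat) : Int) - 1 + (dcount ((rl.take n).drop (n - k)) : Int)) := by
  intro k
  induction k with
  | zero =>
    intro _
    have hd : (rl.take n).drop (n - 0) = [] :=
      List.drop_eq_nil_of_le (by rw [List.length_take]; omega)
    simp [settleWith, pad, dcount, segPrefix]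
  | succ k ih =>
    intro hk1
    have hk : k ≤ n := by omega
    have hjk : n - k = (n - (k + 1)) + 1 := by omega
    have hidx : n - (k + 1) < (rl.take n).length := by
      rw [List.length_take]; omega
    have hrange : List.range' (n - (k + 1)) (k + 1) =
        (n - (k + 1)) :: List.range' (n - k) k := by
      rw [List.range'_succ, ← hjk]
    have hdrop : (rl.take n).drop (n - (k + 1)) =
        (rl.take n)[n - (k + 1)] :: (rl.take n).drop (n - k) := by
      rw [hjk]; exact List.drop_eq_getElem_cons hidx
    have hread : PySem.List.pyGetD rl ((n - (k + 1) : Nat) : Int) "" =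
        (rl.take n)[n - (k + 1)] := by
      rw [PySem.List.pyGetD_natCast, List.getElem_take,
        getD_of_lt' _ _ _ (by omega)]
    rw [hrange]
    simp only [List.reverse_cons, List.map_append, List.map_cons, List.map_nil,
      List.foldl_append, List.foldl_cons, List.foldl_nil]
    rw [ih hk]
    set c := (rl.take n)[n - (k + 1)] with hc
    set s' := (rl.take n).drop (n - k) with hs'
    rw [hdrop]
    by_cases hdot : c = "."
    · -- '.': no move, the dot prefix grows
      rw [show (c :: s') = "." :: s' from by rw [hdot], sf_dot, dcount_cons_dot]
      simp only [stepP, hread]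
      rw [if_neg (by simp [hdot])]
      have e1 : List.replicate (n - k) (".":String) ++ settleWith [] s' =
          List.replicate (n - (k + 1)) "." ++ "." :: settleWith [] s' := by
        rw [hjk, List.replicate_succ', List.append_assoc]; rfl
      rw [e1]
      simp only [Prod.mk.injEq, true_and]
      push_cast; omega
    · by_cases hwall : c = "*"
      · -- '*': the wall pins itself at its own index
        rw [show (c :: s') = "*" :: s' from by rw [hwall], sf_wall, dcount_cons_wall]
        simp only [stepP, hread]
        rw [if_pos (by simpa using hdot), if_pos hwall, PySem.List.pySetD_natCast]
        have e1 : List.replicate (n - k) (".":String) ++ settleWith [] s' =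
            List.replicate (n - (k + 1)) "." ++ "." :: settleWith [] s' := by
          rw [hjk, List.replicate_succ', List.append_assoc]; rfl
        rw [e1, set_rep]
        simp only [Prod.mk.injEq]
        constructor
        · rw [hwall]
        · push_cast; omega
      · -- a stone lands on the last dot of the combined dot prefix
        rw [sf_stone c s' hdot hwall]
        simp only [stepP, hread]
        rw [if_pos (by simpa using hdot), if_neg hwall]
        have eland : ((n - k : Nat) : Int) - 1 + (dcount s' : Int) =
            (((n - (k + 1)) + dcount s' : Nat) : Int) := by push_cast; omega
        rw [eland, PySem.List.pySetD_natCast]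
        have e1 : List.replicate (n - k) (".":String) ++ settleWith [] s' =
            List.replicate ((n - (k + 1)) + dcount s') "." ++ "." ::
              ((segPrefix s').filter (fun x => x ≠ ".") ++ tailPart s') := by
          rw [sf_decomp s', ← List.append_assoc, ← List.replicate_add,
            show n - k + dcount s' = ((n - (k + 1)) + dcount s') + 1 from by omega,
            List.replicate_succ', List.append_assoc]
          rfl
        rw [e1, set_rep]
        simp only [Prod.mk.injEq]
        constructor
        · conv_rhs => rw [← List.append_assoc, ← List.replicate_add]
        · rw [dcount_cons_stone c s' hdot hwall]
          push_cast; omega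

theorem foldl_min_const (l : List (List String)) (n : Nat)
    (h : ∀ r ∈ l, r.length = n) : l.foldl (fun acc r => min acc r.length) n = n := by
  induction l with
  | nil => rfl
  | cons x t ih =>
    simp only [List.foldl_cons, h x (by simp), min_self]
    exact ih (fun r hr => h r (by simp [hr]))

theorem zipStar_uniform (xss : List (List String)) (n : Nat) (hne : xss ≠ [])
    (h : ∀ r ∈ xss, r.length = n) :
    zipStar xss = (List.range n).map (fun i => xss.map (fun r => r.getD i "")) := by
  cases xss with
  | nil => exact absurd rfl hne
  | cons x rest =>
    show (List.range (rest.foldl (fun acc r => min acc r.length) x.length)).map _ = _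
    rw [h x (by simp), foldl_min_const rest n (fun r hr => h r (by simp [hr]))]

theorem foldB : ∀ (s acc seg : List String),
    (s.foldl rowStepB (acc, seg)).1 ++ pad (s.foldl rowStepB (acc, seg)).2 =
      acc ++ settleWith seg s := by
  intro s
  induction s with
  | nil => intro acc seg; simp [settleWith]
  | cons c t ih =>
    intro acc seg
    by_cases hc : c = "*"
    · subst hc
      simp only [List.foldl_cons, rowStepB, ih, settleWith]
      simp [List.append_assoc]
    · simp [List.foldl_cons, rowStepB, hc, ih, settleWith]

theorem settleRowB_eq_sf (rl : List String) (n : Nat) :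
    settleRowB ((n : Nat) : Int) rl = settleWith [] (rl.take n) := by
  unfold settleRowB
  rw [PySem.List.slice_to_natCast]
  simpa using foldB (rl.take n) [] []

theorem settleRowP_eq_B (rl : List String) (n : Nat) (hn : n ≤ rl.length) :
    settleRowP ((n : Nat) : Int) rl = settleRowB ((n : Nat) : Int) rl := by
  rw [settleRowB_eq_sf]
  unfold settleRowP
  have hr : PySem.List.pyRange (((n : Nat) : Int) - 1) (-1) (-1) =
      ((List.range' 0 n).reverse.map (fun m : Nat => (m : Int))) := by
    rw [PySem.List.pyRange_neg_one_eq_reverse,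
      show (-1 : Int) + 1 = 0 from by norm_num,
      show ((n : Nat) : Int) - 1 + 1 = ((n : Nat) : Int) from by ring,
      PySem.List.pyRange_one, ← List.map_reverse, List.range_eq_range']
    simp
  have h := scan_inv rl n hn n le_rfl
  simp only [Nat.sub_self, List.replicate_zero, List.nil_append] at h
  rw [hr, show (((n : Nat) : Int)).toNat = n from by simp, h]
  simp

theorem rotate_box_core (box : List (List String)) (hne : box ≠ [])
    (hlen : ∀ r ∈ box, (box.headD []).length ≤ r.length) :
    rotate_box box = rotate_box_alt box := by
  obtain ⟨P1, P2, P3, P4⟩ := outer_inv box box.length le_rfl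
  rw [rotate_box_eq_roK]
  have hb0 : PySem.List.pyGetD box 0 [] = box.headD [] := by
    cases box with
    | nil => exact absurd rfl hne
    | cons x t =>
      rw [show (0 : Int) = ((0 : Nat) : Int) from rfl, PySem.List.pyGetD_natCast]; rfl
  have hnr : ∀ r ∈ box, (PySem.List.pyGetD box 0 []).length ≤ r.length := by
    intro r hr; rw [hb0]; exact hlen r hr
  show roK box box.length = rotate_box_alt box
  unfold rotate_box_alt
  have hslen : ∀ r ∈ (box.map (settleRowB ((PySem.List.pyGetD box 0 []).length : Int))).reverse,
      r.length = (PySem.List.pyGetD box 0 []).length := by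
    intro r hr
    rw [List.mem_reverse, List.mem_map] at hr
    obtain ⟨a, ha, rfl⟩ := hr
    rw [settleRowB_eq_sf, settleWith_length, List.length_take]
    have := hnr a ha
    simp
    omega
  rw [zipStar_uniform _ _ (by simp [hne]) hslen]
  apply List.ext_getElem
  · rw [P1]; simp
  · intro c h1 h2
    rw [List.getElem_map, List.getElem_range]
    have hc : c < (PySem.List.pyGetD box 0 []).length := by rw [P1] at h1; exact h1
    apply List.ext_getElem
    · rw [← getD_of_lt _ _ _ h1, P2 c hc]; simp
    · intro j g1 g2
      have hj : j < box.length := by simpa using g2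
      rw [List.getElem_map, List.getElem_reverse, List.getElem_map]
      have hmem : box[(box.map (settleRowB ((PySem.List.pyGetD box 0 []).length : Int))).length - 1 - j]'(by simp only [List.length_map]; omega) ∈ box := List.getElem_mem _
      rw [← settleRowP_eq_B _ _ (hnr _ hmem)]
      have hlm : (box.map (settleRowB ((PySem.List.pyGetD box 0 []).length : Int))).length - 1 - j = box.length - 1 - j := by simp
      have key := P3 c hc (box.length - 1 - j) (by omega)
      have hbget : box.getD (box.length - 1 - j) [] = box[box.length - 1 - j]'(by omega) :=
        getD_of_lt _ _ _ (by omega)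
      rw [hbget] at key
      have harith : box.length - 1 - (box.length - 1 - j) = j := by omega
      rw [harith] at key
      have e1 : (roK box box.length)[c]'h1 = (roK box box.length).getD c [] :=
        (getD_of_lt _ _ _ h1).symm
      have g1' : j < ((roK box box.length).getD c []).length := by
        rw [P2 c hc]; exact hj
      simp only [List.length_map]
      simp only [e1]
      rw [← getD_of_lt _ _ _ g1']
      exact key

-- ===== VERDICT (by name: the statement is the Claim_ definition above) =====
theorem rotate_box_spec : Claim_equal_rotate_box := by
  intro box _ hpre
  unfold Spec_rotate_box
  exact rotate_box_core box hpre.1 hpre.2
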